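-- pv_equiv track=rewrite | github.com/jk-jung/problem-solving | codewars/6kyu/6_Loneliest character.py | loneliest
-- ===== SOURCE A (Python) =====
-- def loneliest(s):
--     r = []
--     s = s.strip()
--     for i, x in enumerate(s):
--         if x != ' ':
--             t = 0
--             for j in range(i - 1, -1, -1):
--                 if s[j] == ' ': t += 1
--                 else: break
--             for j in range(i + 1, len(s)):
--                 if s[j] == ' ': t += 1
--                 else: break
--             r.append((t, x))
--     m = max(r)[0]
--     return [x[1] for x in r if x[0] == m]
-- ===== SOURCE B (Python) =====
-- def loneliest(s):
--     s = s.strip()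
--     chars = []
--     left = []
--     run = 0
--     for ch in s:
--         if ch == ' ':
--             run += 1
--         else:
--             chars.append(ch)
--             left.append(run)
--             run = 0
--     right = []
--     run = 0
--     for ch in reversed(s):
--         if ch == ' ':
--             run += 1
--         else:
--             right.append(run)
--             run = 0
--     right.reverse()
--     counts = [l + r for l, r in zip(left, right)]
--     m = max(counts)
--     return [c for c, t in zip(chars, counts) if t == m]
-- ===== Notes on version B (the rewrite author's own statement) =====
-- stated objective: faster
-- what changed: Replaces A's per-character bidirectional inner scans with two linear run-length passes (forward for left space runs, backward for right space runs) combined by zipping, then a single max/filter.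
import Mathlib
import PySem

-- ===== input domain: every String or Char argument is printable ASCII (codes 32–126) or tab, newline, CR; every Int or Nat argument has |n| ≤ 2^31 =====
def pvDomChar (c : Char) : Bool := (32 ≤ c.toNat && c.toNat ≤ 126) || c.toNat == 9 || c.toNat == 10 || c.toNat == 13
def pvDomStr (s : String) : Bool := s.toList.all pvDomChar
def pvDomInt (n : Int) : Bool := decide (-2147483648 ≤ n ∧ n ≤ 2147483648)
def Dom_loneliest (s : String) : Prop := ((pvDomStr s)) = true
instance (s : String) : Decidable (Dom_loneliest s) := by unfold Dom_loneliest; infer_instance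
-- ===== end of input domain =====

-- B replaces A's per-character bidirectional inner scans by two linear run-length passes
-- (forward left-run, backward right-run) zipped together, then one max/filter pass.

-- ===== PORT A =====
-- inner scan 'for j in range(i-1,-1,-1): count while space' — value of the downward scan starting at i-1
def scanL (l : List Char) : Nat → Nat
  | 0 => 0
  | j+1 => if l.getD j 'a' = ' ' then scanL l j + 1 else 0

-- inner scan 'for j in range(i+1,len(s)): count while space'
def scanR (l : List Char) (j : Nat) : Nat :=
  if h : j < l.length then (if l.getD j 'a' = ' ' then scanR l (j+1) + 1 else 0) else 0
termination_by l.length - j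

def loneliest (s : String) : List String :=
  let l := (PySem.Str.strip s).toList
  let r := (PySem.List.enumerate l).foldl
      (fun r ix => if ix.2 ≠ ' ' then r ++ [(scanL l ix.1.toNat + scanR l (ix.1.toNat + 1), ix.2)] else r)
      []
  match PySem.List.max2? r (fun p => p.1) (fun p => p.2) with
  | some p => r.filterMap (fun q => if q.1 = p.1 then some (String.ofList [q.2]) else none)
  | none => []   -- unreachable under Pre_: Python's max([]) raises ValueError

-- ===== PORT B =====
def loneliest_alt (s : String) : List String :=
  let l := (PySem.Str.strip s).toList
  let p1 := l.foldl (fun (st : List Char × List Nat × Nat) ch =>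
      if ch = ' ' then (st.1, st.2.1, st.2.2 + 1) else (st.1 ++ [ch], st.2.1 ++ [st.2.2], 0)) ([], [], 0)
  let chars := p1.1
  let left := p1.2.1
  let p2 := l.reverse.foldl (fun (st : List Nat × Nat) ch =>
      if ch = ' ' then (st.1, st.2 + 1) else (st.1 ++ [st.2], 0)) ([], 0)
  let right := p2.1.reverse
  let counts := (left.zip right).map (fun lr => lr.1 + lr.2)
  match PySem.List.max? counts (fun x => x) with
  | some m => (chars.zip counts).filterMap (fun ct => if ct.2 = m then some (String.ofList [ct.1]) else none)
  | none => []   -- unreachable under Pre_: Python's max([]) raises ValueError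

-- ===== PRECONDITION & SPEC =====
-- Pre_ excludes exactly the inputs whose strip() is empty, where A's (and B's) max([]) raises ValueError.
def Pre_loneliest (s : String) : Prop := (PySem.Str.strip s).toList ≠ []
instance (s : String) : Decidable (Pre_loneliest s) := by unfold Pre_loneliest; infer_instance
def pvWitness_loneliest : String := "a b"

def Spec_loneliest (s : String) (out : List String) : Prop := out = loneliest_alt s
instance (s : String) (out : List String) : Decidable (Spec_loneliest s out) := by unfold Spec_loneliest; infer_instance

-- ===== CLAIM (what is proved, stated in full; the proofs are below) =====
def Claim_equal_loneliest : Prop := ∀ (s : String), Dom_loneliest s → Pre_loneliest s → Spec_loneliest s (loneliest s)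

-- ===== LEMMAS AND PROOFS =====

-- length of the leading space run
def lead : List Char → Nat
  | [] => 0
  | c :: t => if c = ' ' then lead t + 1 else 0

-- reference list: for each non-space char, (left run + right run, char), given `a` spaces to its left
def spec : List Char → Nat → List (Nat × Char)
  | [], _ => []
  | c :: t, a => if c = ' ' then spec t (a+1) else (a + lead t, c) :: spec t 0

-- left-only version
def specL : List Char → Nat → List (Nat × Char)
  | [], _ => []
  | c :: t, a => if c = ' ' then specL t (a+1) else (a, c) :: specL t 0

-- right run of each non-space char, in order
def rights : List Char → List Nat
  | [] => []
  | c :: t => if c = ' ' then rights t else lead t :: rights t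

-- trailing space-run accumulator after processing the list starting from run `a`
def trail : List Char → Nat → Nat
  | [], a => a
  | c :: t, a => if c = ' ' then trail t (a+1) else trail t 0

theorem scanR_lead (l : List Char) (j : Nat) : scanR l j = lead (l.drop j) := by
  by_cases h : j < l.length
  · have hd : l.drop j = l[j] :: l.drop (j+1) := List.drop_eq_getElem_cons h
    have hg : l.getD j 'a' = l[j] := by simp [List.getD_eq_getElem?_getD, List.getElem?_eq_getElem h]
    rw [scanR, dif_pos h, hg, scanR_lead l (j+1), hd, lead]
  · rw [scanR, dif_neg h, List.drop_eq_nil_of_le (by omega), lead]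
termination_by l.length - j

theorem scanL_succ (l : List Char) (j : Nat) :
    scanL l (j+1) = if l.getD j 'a' = ' ' then scanL l j + 1 else 0 := rfl

theorem lemmaA (t : List Char) : ∀ (k : Nat) (acc : List (Nat × Char)) (l : List Char),
    l.drop k = t →
    (PySem.List.enumerate t (k : Int)).foldl
      (fun r ix => if ix.2 ≠ ' ' then r ++ [(scanL l ix.1.toNat + scanR l (ix.1.toNat + 1), ix.2)] else r)
      acc
    = acc ++ spec t (scanL l k) := by
  induction t with
  | nil => intro k acc l _; simp [PySem.List.enumerate_nil, spec]
  | cons c t ih =>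
    intro k acc l hdrop
    have hk : k < l.length := by
      by_contra h
      rw [List.drop_eq_nil_of_le (by omega)] at hdrop
      exact absurd hdrop (by simp)
    have hd : l.drop k = l[k] :: l.drop (k+1) := List.drop_eq_getElem_cons hk
    rw [hd] at hdrop
    have hc : l[k] = c := (List.cons.injEq _ _ _ _ ▸ hdrop).1
    have ht : l.drop (k+1) = t := (List.cons.injEq _ _ _ _ ▸ hdrop).2
    have hg : l.getD k 'a' = c := by
      simp [List.getD_eq_getElem?_getD, List.getElem?_eq_getElem hk, hc]
    have hcast : (k : Int) + 1 = ((k + 1 : Nat) : Int) := by push_cast; ring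
    rw [PySem.List.enumerate_cons, List.foldl_cons, hcast]
    by_cases hsp : c = ' '
    · have hscan : scanL l (k+1) = scanL l k + 1 := by rw [scanL_succ, hg, if_pos hsp]
      simp only [hsp, ne_eq, not_true_eq_false, if_false]
      rw [ih (k+1) acc l ht, hscan, spec, if_pos rfl]
    · have hscan : scanL l (k+1) = 0 := by rw [scanL_succ, hg, if_neg hsp]
      have hR : scanR l (k+1) = lead t := by rw [scanR_lead, ht]
      simp only [ne_eq, hsp, not_false_eq_true, if_true, Int.toNat_natCast]
      rw [ih (k+1) (acc ++ [(scanL l k + scanR l (k+1), c)]) l ht, hscan, hR, spec, if_neg hsp]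
      simp

theorem lemmaBleft (t : List Char) : ∀ (cs : List Char) (ls : List Nat) (a : Nat),
    t.foldl (fun (st : List Char × List Nat × Nat) ch =>
      if ch = ' ' then (st.1, st.2.1, st.2.2 + 1) else (st.1 ++ [ch], st.2.1 ++ [st.2.2], 0)) (cs, ls, a)
    = (cs ++ (specL t a).map Prod.snd, ls ++ (specL t a).map Prod.fst, trail t a) := by
  induction t with
  | nil => intro cs ls a; simp [specL, trail]
  | cons c t ih =>
    intro cs ls a
    by_cases hsp : c = ' ' <;> simp [specL, trail, hsp, ih]

theorem lemmaBright (t : List Char) : ∀ (rs : List Nat) (a : Nat),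
    t.foldl (fun (st : List Nat × Nat) ch =>
      if ch = ' ' then (st.1, st.2 + 1) else (st.1 ++ [st.2], 0)) (rs, a)
    = (rs ++ (specL t a).map Prod.fst, trail t a) := by
  induction t with
  | nil => intro rs a; simp [specL, trail]
  | cons c t ih =>
    intro rs a
    by_cases hsp : c = ' ' <;> simp [specL, trail, hsp, ih]

theorem trail_append (xs ys : List Char) : ∀ a, trail (xs ++ ys) a = trail ys (trail xs a) := by
  induction xs with
  | nil => intro a; rfl
  | cons c t ih => intro a; by_cases hsp : c = ' ' <;> simp [trail, hsp, ih]

theorem specL_append (xs ys : List Char) : ∀ a, specL (xs ++ ys) a = specL xs a ++ specL ys (trail xs a) := by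
  induction xs with
  | nil => intro a; rfl
  | cons c t ih => intro a; by_cases hsp : c = ' ' <;> simp [specL, trail, hsp, ih]

theorem trail_reverse (t : List Char) : trail t.reverse 0 = lead t := by
  induction t with
  | nil => rfl
  | cons c t ih =>
    rw [List.reverse_cons, trail_append, ih]
    by_cases hsp : c = ' ' <;> simp [trail, lead, hsp]

theorem map_fst_specL_reverse (t : List Char) :
    (specL t.reverse 0).map Prod.fst = (rights t).reverse := by
  induction t with
  | nil => rfl
  | cons c t ih =>
    rw [List.reverse_cons, specL_append, trail_reverse]
    by_cases hsp : c = ' ' <;> simp [specL, rights, hsp, ih]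

theorem spec_zipWith (t : List Char) : ∀ a,
    spec t a = List.zipWith (fun (p : Nat × Char) (r : Nat) => (p.1 + r, p.2)) (specL t a) (rights t) := by
  induction t with
  | nil => intro a; rfl
  | cons c t ih => intro a; by_cases hsp : c = ' ' <;> simp [spec, specL, rights, hsp, ih]

theorem zc1 (xs : List (Nat × Char)) : ∀ (ys : List Nat),
    ((xs.map Prod.fst).zip ys).map (fun lr => lr.1 + lr.2)
      = (List.zipWith (fun (p : Nat × Char) (r : Nat) => (p.1 + r, p.2)) xs ys).map Prod.fst := by
  induction xs with
  | nil => intro ys; simp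
  | cons x xs ih => intro ys; cases ys with
    | nil => simp
    | cons y ys => simp [ih]

theorem map_snd_spec (t : List Char) : ∀ a, (spec t a).map Prod.snd = (specL t a).map Prod.snd := by
  induction t with
  | nil => intro a; rfl
  | cons c t ih => intro a; by_cases hsp : c = ' ' <;> simp [spec, specL, hsp, ih]

theorem zip_map_snd_fst (R : List (Nat × Char)) :
    (R.map Prod.snd).zip (R.map Prod.fst) = R.map (fun p => (p.2, p.1)) := by
  induction R with
  | nil => rfl
  | cons q R ih => simp [ih]

-- the first component of Python's lexicographic max over the (count, char) pairs is the max of the counts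
theorem max2_fst (T : List (Nat × Char)) : ∀ (q : Nat × Char),
    (PySem.List.max2? (q :: T) (fun p => p.1) (fun p => p.2)).map Prod.fst
      = some ((T.map Prod.fst).foldl max q.1) := by
  induction T with
  | nil => intro q; simp [PySem.List.max2?]
  | cons x T ih =>
    intro q
    simp only [PySem.List.max2?, List.foldl_cons] at ih ⊢
    simp only [List.map_cons, List.foldl_cons]
    split
    · rename_i h
      rw [ih x]
      have : max q.1 x.1 = x.1 := by
        simp only [Bool.or_eq_true, Bool.and_eq_true, Bool.not_eq_true', decide_eq_true_eq,
          decide_eq_false_iff_not] at h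
        rcases h with h | ⟨h, _⟩ <;> omega
      rw [this]
    · rename_i h
      rw [ih q]
      have : max q.1 x.1 = q.1 := by
        simp only [Bool.or_eq_true, Bool.and_eq_true, Bool.not_eq_true', decide_eq_true_eq,
          decide_eq_false_iff_not] at h
        omega
      rw [this]

-- ===== VERDICT (by name: the statement is the Claim_ definition above) =====
theorem scanL_zero (l : List Char) : scanL l 0 = 0 := rfl

theorem loneliest_spec : Claim_equal_loneliest := by
  intro s _ _
  unfold Spec_loneliest loneliest loneliest_alt
  set l := (PySem.Str.strip s).toList with hl
  dsimp only
  have h0 := lemmaA l 0 [] l rfl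
  simp only [Nat.cast_zero, List.nil_append, scanL_zero] at h0
  rw [h0]
  rw [lemmaBleft l [] [] 0, lemmaBright l.reverse [] 0]
  simp only [List.nil_append]
  rw [map_fst_specL_reverse, List.reverse_reverse]
  rw [zc1, ← spec_zipWith, ← map_snd_spec, zip_map_snd_fst]
  cases hR : spec l 0 with
  | nil => simp [PySem.List.max2?, PySem.List.max?]
  | cons q T =>
    have hB : PySem.List.max? ((q :: T).map Prod.fst) (fun x : Nat => x)
        = some ((T.map Prod.fst).foldl max q.1) := by
      rw [List.map_cons, PySem.List.max?_id_cons]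
    rw [hB]
    cases hp : PySem.List.max2? (q :: T) (fun p : Nat × Char => p.1) (fun p => p.2) with
    | none => exact absurd (hp ▸ max2_fst T q) (by simp)
    | some p =>
      have hp1 : p.1 = (T.map Prod.fst).foldl max q.1 := by
        have := hp ▸ max2_fst T q
        simpa using this
      rw [← hp1]
      simp only [List.filterMap_map]
      rfl
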